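-- pv_equiv track=rewrite | github.com/manuelvb937/Scrapping | src/analysis/pipeline.py | _match_representative_indices
-- ===== SOURCE A (Python) =====
-- def _match_representative_indices(
--     cluster_indices: list[int],
--     cluster_texts: list[str],
--     representative_texts: list[str],
-- ) -> set[int]:
--     matched: set[int] = set()
--     for representative in representative_texts:
--         for original_index, text in zip(cluster_indices, cluster_texts):
--             if original_index in matched:
--                 continue
--             if text[:300] == representative:
--                 matched.add(original_index)
--                 break
--     return matched
-- ===== SOURCE B (Python) =====
-- def _match_representative_indices(
--     cluster_indices: list[int],
--     cluster_texts: list[str],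
--     representative_texts: list[str],
-- ) -> set[int]:
--     # Group original indices by their 300-char text prefix once; each
--     # representative then consumes from its own group, skipping (and
--     # permanently dropping) indices already matched.
--     groups: dict[str, list[int]] = {}
--     for i, t in zip(cluster_indices, cluster_texts):
--         groups.setdefault(t[:300], []).append(i)
--     matched: set[int] = set()
--     for rep in representative_texts:
--         lst = groups.get(rep, [])
--         k = 0
--         while k < len(lst) and lst[k] in matched:
--             k += 1
--         if k < len(lst):
--             matched.add(lst[k])
--             groups[rep] = lst[k + 1:]
--         else:
--             groups[rep] = []
--     return matched
-- ===== Notes on version B (the rewrite author's own statement) =====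
-- stated objective: faster
-- what changed: B builds a dict mapping each 300-char text prefix to its list of original indices once, then serves each representative from that list with a per-prefix cursor that permanently drops already-matched indices, instead of A's full rescan of all (index, text) pairs per representative.
import Mathlib
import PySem

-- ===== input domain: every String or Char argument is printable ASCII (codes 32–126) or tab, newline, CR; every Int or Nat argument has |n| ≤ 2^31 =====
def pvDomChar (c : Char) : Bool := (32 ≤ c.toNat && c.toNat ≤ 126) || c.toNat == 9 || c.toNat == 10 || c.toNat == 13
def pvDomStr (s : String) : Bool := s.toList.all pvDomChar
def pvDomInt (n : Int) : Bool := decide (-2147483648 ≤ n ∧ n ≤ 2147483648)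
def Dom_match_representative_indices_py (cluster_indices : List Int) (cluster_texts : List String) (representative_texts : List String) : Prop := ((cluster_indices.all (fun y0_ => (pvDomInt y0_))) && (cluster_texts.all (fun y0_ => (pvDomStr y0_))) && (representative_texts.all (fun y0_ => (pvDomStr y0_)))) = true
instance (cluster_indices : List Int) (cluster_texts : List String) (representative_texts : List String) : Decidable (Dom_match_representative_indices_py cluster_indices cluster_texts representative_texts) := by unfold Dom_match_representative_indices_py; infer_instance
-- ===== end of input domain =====

-- B replaces A's per-representative rescans with a prefix->indices dict consumed left-to-right (objective: faster).

-- ===== PORT A =====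
-- t[:300]
def pvPfx (t : String) : String := PySem.Str.slice t none (some 300)

-- A's inner loop: for (i, t) in zip(...): continue if matched, add+break on prefix match
def pvInnerA (matched : PySem.Set Int) (rep : String) : List (Int × String) → PySem.Set Int
  | [] => matched
  | (i, t) :: rest =>
    if matched.contains i then pvInnerA matched rep rest
    else if pvPfx t == rep then matched.add i
    else pvInnerA matched rep rest

def match_representative_indices_py (cluster_indices : List Int) (cluster_texts : List String) (representative_texts : List String) : List Int :=
  representative_texts.foldl (fun m rep => pvInnerA m rep (cluster_indices.zip cluster_texts)) PySem.Set.empty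

-- ===== PORT B =====
-- one step of B's loop over representatives: state = (groups dict, matched set)
def pvStepB (st : PySem.Dict String (List Int) × PySem.Set Int) (rep : String) :
    PySem.Dict String (List Int) × PySem.Set Int :=
  let lst := st.1.getD rep []
  -- while k < len(lst) and lst[k] in matched: k += 1
  match lst.dropWhile (fun i => st.2.contains i) with
  | [] => (st.1.insert rep [], st.2)
  | i :: rs => (st.1.insert rep rs, st.2.add i)

def match_representative_indices_py_alt (cluster_indices : List Int) (cluster_texts : List String) (representative_texts : List String) : List Int :=
  -- groups.setdefault(t[:300], []).append(i)
  let groups := ((cluster_indices.zip cluster_texts).map (fun p => (pvPfx p.2, p.1))).foldl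
    (fun d p => d.modify p.1 [] (· ++ [p.2])) PySem.Dict.empty
  (representative_texts.foldl pvStepB (groups, PySem.Set.empty)).2

-- ===== PRECONDITION & SPEC =====
def Spec_match_representative_indices_py (cluster_indices : List Int) (cluster_texts : List String) (representative_texts : List String) (out : List Int) : Prop := out = match_representative_indices_py_alt cluster_indices cluster_texts representative_texts
instance (cluster_indices : List Int) (cluster_texts : List String) (representative_texts : List String) (out : List Int) : Decidable (Spec_match_representative_indices_py cluster_indices cluster_texts representative_texts out) := by unfold Spec_match_representative_indices_py; infer_instance

-- ===== CLAIM (what is proved, stated in full; the proofs are below) =====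
def Claim_equal_match_representative_indices_py : Prop := ∀ (cluster_indices : List Int) (cluster_texts : List String) (representative_texts : List String), Dom_match_representative_indices_py cluster_indices cluster_texts representative_texts → Spec_match_representative_indices_py cluster_indices cluster_texts representative_texts (match_representative_indices_py cluster_indices cluster_texts representative_texts)

-- ===== LEMMAS AND PROOFS =====

-- indices of the pairs whose prefix is c, in position order
def pvGroup (pairs : List (Int × String)) (c : String) : List Int :=
  (pairs.filter (fun p => pvPfx p.2 == c)).map (·.1)

-- A's inner loop = first unmatched element of the group, if any
theorem pvInnerA_eq (m : PySem.Set Int) (rep : String) (pairs : List (Int × String)) :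
    pvInnerA m rep pairs =
      match (pvGroup pairs rep).dropWhile (fun i => decide (i ∈ m)) with
      | [] => m
      | i :: _ => m.add i := by
  induction pairs with
  | nil => simp [pvInnerA, pvGroup]
  | cons p rest ih =>
    obtain ⟨i, t⟩ := p
    by_cases hm : i ∈ m <;> by_cases hp : pvPfx t == rep <;>
      simp [pvInnerA, pvGroup, hp, hm] <;>
      simp [pvGroup] at ih <;> rw [ih]

-- invariant relating B's dict state to the full groups: what was dropped is matched
def pvInv (g : PySem.Dict String (List Int)) (m : PySem.Set Int) (pairs : List (Int × String)) : Prop :=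
  ∀ c, ∃ pre, pvGroup pairs c = pre ++ g.getD c [] ∧ ∀ x ∈ pre, x ∈ m

theorem pvMain (pairs : List (Int × String)) (rt : List String) :
    ∀ (g : PySem.Dict String (List Int)) (m : PySem.Set Int), pvInv g m pairs →
      (rt.foldl pvStepB (g, m)).2 = rt.foldl (fun m rep => pvInnerA m rep pairs) m := by
  induction rt with
  | nil => intro g m _; rfl
  | cons rep rt ih =>
    intro g m hinv
    obtain ⟨pre, hsplit, hpre⟩ := hinv rep
    have hnil : pre.dropWhile (fun i => decide (i ∈ m)) = [] :=
      List.dropWhile_eq_nil_iff.mpr (by intro x hx; simpa using hpre x hx)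
    have hdw : (pvGroup pairs rep).dropWhile (fun i => decide (i ∈ m))
        = (g.getD rep []).dropWhile (fun i => decide (i ∈ m)) := by
      rw [hsplit, List.dropWhile_append, hnil]; simp
    simp only [List.foldl_cons]
    rw [pvInnerA_eq, hdw]
    set lst := g.getD rep [] with hlst
    cases hrest : lst.dropWhile (fun i => decide (i ∈ m)) with
    | nil =>
      have hall : ∀ x ∈ lst, x ∈ m := by
        intro x hx; simpa using List.dropWhile_eq_nil_iff.mp hrest x hx
      have hstep : pvStepB (g, m) rep = (g.insert rep [], m) := by
        simp only [pvStepB, ← hlst]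
        rw [show (lst.dropWhile fun i => PySem.Set.contains m i) = [] by simpa using hrest]
      rw [hstep]
      apply ih
      intro c
      by_cases hc : c = rep
      · subst hc
        refine ⟨pvGroup pairs c, by simp, ?_⟩
        intro x hx
        rw [hsplit] at hx
        rcases List.mem_append.mp hx with h | h
        · exact hpre x h
        · exact hall x h
      · obtain ⟨pre', hs', hp'⟩ := hinv c
        exact ⟨pre', by simpa [PySem.Dict.getD_insert, hc] using hs', hp'⟩
    | cons i rs =>
      have hstep : pvStepB (g, m) rep = (g.insert rep rs, m.add i) := by
        simp only [pvStepB, ← hlst]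
        rw [show (lst.dropWhile fun j => PySem.Set.contains m j) = i :: rs by simpa using hrest]
      rw [hstep]
      apply ih
      intro c
      by_cases hc : c = rep
      · subst hc
        refine ⟨pre ++ (lst.takeWhile (fun j => decide (j ∈ m))) ++ [i], ?_, ?_⟩
        · rw [PySem.Dict.getD_insert]
          rw [hsplit, ← hlst]
          conv_lhs => rw [← List.takeWhile_append_dropWhile (p := fun j => decide (j ∈ m)) (l := lst)]
          rw [hrest]
          simp
        · intro x hx
          simp only [List.mem_append, List.mem_singleton] at hx
          rcases hx with (h | h) | h
          · exact (PySem.Set.mem_add _ _ _).mpr (Or.inl (hpre x h))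
          · exact (PySem.Set.mem_add _ _ _).mpr (Or.inl (by simpa using List.mem_takeWhile_imp h))
          · subst h
            exact (PySem.Set.mem_add _ _ _).mpr (Or.inr rfl)
      · obtain ⟨pre', hs', hp'⟩ := hinv c
        exact ⟨pre', by simpa [PySem.Dict.getD_insert, hc] using hs',
          fun x hx => (PySem.Set.mem_add _ _ _).mpr (Or.inl (hp' x hx))⟩

-- the dict B builds holds exactly the groups
theorem pvGroups_getD (pairs : List (Int × String)) (c : String) :
    (((pairs.map (fun p => (pvPfx p.2, p.1))).foldl
        (fun d p => d.modify p.1 [] (· ++ [p.2])) PySem.Dict.empty).getD c []) = pvGroup pairs c := by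
  rw [PySem.Dict.getD_foldl_modify_append]
  simp [pvGroup, List.filter_map, List.map_map, Function.comp_def]

-- ===== VERDICT (by name: the statement is the Claim_ definition above) =====
theorem match_representative_indices_py_spec : Claim_equal_match_representative_indices_py := by
  intro ci ct rt _
  unfold Spec_match_representative_indices_py
  unfold match_representative_indices_py match_representative_indices_py_alt
  rw [pvMain (ci.zip ct) rt]
  intro c
  exact ⟨[], by simp [pvGroups_getD], by simp⟩
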